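-- pv_equiv track=rewrite | github.com/chisngyen/fse-aiware-python-dependencies | tools/smart-resolver/src/confidence_cascade.py | smart_python_version_from_imports
-- ===== SOURCE A (Python) =====
-- from typing import Dict, List, Optional, Tuple
--
-- def smart_python_version_from_imports(modules: List[str]) -> Optional[str]:
--     """
--     Infer Python version from the package ecosystem.
--     Some packages only work on specific Python versions.
--     """
--     modules_lower = {m.lower() for m in modules}
--
--     # Python 2 only packages
--     py2_only = {'mechanize', 'cookielib', 'htmlparser', 'cstringio',
--                 'urlparse', 'httplib', 'basehttpserver', 'simplehttpserver'}
--     if modules_lower & py2_only: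
--         return '2.7'
--
--     # Python 3.7+ packages (need typing_extensions, dataclasses, etc.)
--     py37_plus = {'dataclasses', 'contextvars'}
--     if modules_lower & py37_plus:
--         return '3.7'
--
--     # Async-heavy → at least 3.6
--     async_pkgs = {'aiohttp', 'asyncpg', 'httpx', 'fastapi', 'uvicorn'}
--     if modules_lower & async_pkgs:
--         return '3.7'
--
--     # Modern ML → 3.7+
--     modern_ml = {'transformers', 'diffusers', 'accelerate', 'datasets'}
--     if modules_lower & modern_ml:
--         return '3.8'
--
--     return None
-- ===== SOURCE B (Python) =====
-- from typing import List, Optional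
--
-- _VERSION_TABLE = {
--     'mechanize': (1, '2.7'), 'cookielib': (1, '2.7'), 'htmlparser': (1, '2.7'),
--     'cstringio': (1, '2.7'), 'urlparse': (1, '2.7'), 'httplib': (1, '2.7'),
--     'basehttpserver': (1, '2.7'), 'simplehttpserver': (1, '2.7'),
--     'dataclasses': (2, '3.7'), 'contextvars': (2, '3.7'),
--     'aiohttp': (3, '3.7'), 'asyncpg': (3, '3.7'), 'httpx': (3, '3.7'),
--     'fastapi': (3, '3.7'), 'uvicorn': (3, '3.7'),
--     'transformers': (4, '3.8'), 'diffusers': (4, '3.8'),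
--     'accelerate': (4, '3.8'), 'datasets': (4, '3.8'),
-- }
--
-- def smart_python_version_from_imports(modules: List[str]) -> Optional[str]:
--     best = None
--     for m in modules:
--         entry = _VERSION_TABLE.get(m.lower())
--         if entry is not None and (best is None or entry[0] < best[0]):
--             best = entry
--     return best[1] if best is not None else None
-- ===== Notes on version B (the rewrite author's own statement) =====
-- stated objective: idiomatic
-- what changed: Replaced the four ordered set intersections with one lowercase-keyed table mapping each module to a (priority, version) pair and a single min-tracking pass over the input.
import Mathlib
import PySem

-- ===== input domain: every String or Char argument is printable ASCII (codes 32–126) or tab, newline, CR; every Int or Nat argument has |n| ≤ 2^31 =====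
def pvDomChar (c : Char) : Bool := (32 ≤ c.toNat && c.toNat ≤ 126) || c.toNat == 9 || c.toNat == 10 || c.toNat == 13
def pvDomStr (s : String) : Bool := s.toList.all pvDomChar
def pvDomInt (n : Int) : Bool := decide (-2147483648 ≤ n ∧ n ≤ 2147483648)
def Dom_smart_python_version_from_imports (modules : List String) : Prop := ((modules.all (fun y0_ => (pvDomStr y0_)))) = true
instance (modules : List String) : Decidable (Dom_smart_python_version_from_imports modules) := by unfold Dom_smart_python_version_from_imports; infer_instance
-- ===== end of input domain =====

-- B replaces A's four ordered set intersections by one (priority, version) table and a single min-tracking pass (idiomatic; same cost).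

-- ===== PORT A =====
def smart_python_version_from_imports (modules : List String) : Option String :=
  let modules_lower : PySem.Set String := PySem.Set.ofList (modules.map PySem.Str.lower)
  let py2_only : PySem.Set String := PySem.Set.ofList
    ["mechanize", "cookielib", "htmlparser", "cstringio",
     "urlparse", "httplib", "basehttpserver", "simplehttpserver"]
  if PySem.Set.inter modules_lower py2_only ≠ [] then some "2.7" else
  let py37_plus : PySem.Set String := PySem.Set.ofList ["dataclasses", "contextvars"]
  if PySem.Set.inter modules_lower py37_plus ≠ [] then some "3.7" else
  let async_pkgs : PySem.Set String := PySem.Set.ofList ["aiohttp", "asyncpg", "httpx", "fastapi", "uvicorn"]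
  if PySem.Set.inter modules_lower async_pkgs ≠ [] then some "3.7" else
  let modern_ml : PySem.Set String := PySem.Set.ofList ["transformers", "diffusers", "accelerate", "datasets"]
  if PySem.Set.inter modules_lower modern_ml ≠ [] then some "3.8" else
  none

-- ===== PORT B =====
def pvTable : PySem.Dict String (Int × String) := PySem.Dict.ofList
  [("mechanize", (1, "2.7")), ("cookielib", (1, "2.7")), ("htmlparser", (1, "2.7")),
   ("cstringio", (1, "2.7")), ("urlparse", (1, "2.7")), ("httplib", (1, "2.7")),
   ("basehttpserver", (1, "2.7")), ("simplehttpserver", (1, "2.7")),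
   ("dataclasses", (2, "3.7")), ("contextvars", (2, "3.7")),
   ("aiohttp", (3, "3.7")), ("asyncpg", (3, "3.7")), ("httpx", (3, "3.7")),
   ("fastapi", (3, "3.7")), ("uvicorn", (3, "3.7")),
   ("transformers", (4, "3.8")), ("diffusers", (4, "3.8")),
   ("accelerate", (4, "3.8")), ("datasets", (4, "3.8"))]

def pvStep (best : Option (Int × String)) (m : String) : Option (Int × String) :=
  match pvTable.get? (PySem.Str.lower m) with
  | none => best
  | some e =>
    match best with
    | none => some e
    | some b => if e.1 < b.1 then some e else best

def smart_python_version_from_imports_alt (modules : List String) : Option String :=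
  match modules.foldl pvStep none with
  | none => none
  | some b => some b.2

-- ===== PRECONDITION & SPEC =====
def Spec_smart_python_version_from_imports (modules : List String) (out : Option String) : Prop := out = smart_python_version_from_imports_alt modules
instance (modules : List String) (out : Option String) : Decidable (Spec_smart_python_version_from_imports modules out) := by unfold Spec_smart_python_version_from_imports; infer_instance

-- ===== CLAIM (what is proved, stated in full; the proofs are below) =====
def Claim_equal_smart_python_version_from_imports : Prop := ∀ (modules : List String), Dom_smart_python_version_from_imports modules → Spec_smart_python_version_from_imports modules (smart_python_version_from_imports modules)

-- ===== LEMMAS AND PROOFS =====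

-- the left-biased "keep the smaller priority" combiner underlying B's loop body
def pvComb (a b : Option (Int × String)) : Option (Int × String) :=
  match b with
  | none => a
  | some e =>
    match a with
    | none => some e
    | some x => if e.1 < x.1 then some e else a

theorem pvComb_none_left (b : Option (Int × String)) : pvComb none b = b := by
  cases b <;> rfl

theorem pvComb_assoc (a b c : Option (Int × String)) :
    pvComb (pvComb a b) c = pvComb a (pvComb b c) := by
  cases a <;> cases b <;> cases c <;> simp only [pvComb] <;> split_ifs <;>
    simp only [] <;> split_ifs <;> first | rfl | omega

theorem pvStep_eq_comb (a : Option (Int × String)) (m : String) :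
    pvStep a m = pvComb a (pvTable.get? (PySem.Str.lower m)) := by
  unfold pvStep pvComb
  cases pvTable.get? (PySem.Str.lower m) <;> cases a <;> rfl

theorem pvFoldl_comb (l : List String) (a : Option (Int × String)) :
    l.foldl pvStep a = pvComb a (l.foldl pvStep none) := by
  induction l generalizing a with
  | nil => simp [pvComb]
  | cons m l ih =>
    simp only [List.foldl_cons]
    rw [ih (pvStep a m), ih (pvStep none m), pvStep_eq_comb, pvStep_eq_comb,
      pvComb_none_left, pvComb_assoc]

-- closed form of B's fold: the first (i.e. lowest-priority) table row hit by the input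
def pvSpec (l : List String) : Option (Int × String) :=
  if l.any (fun m => pvTable.get? (PySem.Str.lower m) == some (1, "2.7")) then some (1, "2.7")
  else if l.any (fun m => pvTable.get? (PySem.Str.lower m) == some (2, "3.7")) then some (2, "3.7")
  else if l.any (fun m => pvTable.get? (PySem.Str.lower m) == some (3, "3.7")) then some (3, "3.7")
  else if l.any (fun m => pvTable.get? (PySem.Str.lower m) == some (4, "3.8")) then some (4, "3.8")
  else none

set_option maxHeartbeats 1000000 in
theorem pvItems : pvTable.items =
  [("mechanize", (1, "2.7")), ("cookielib", (1, "2.7")), ("htmlparser", (1, "2.7")),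
   ("cstringio", (1, "2.7")), ("urlparse", (1, "2.7")), ("httplib", (1, "2.7")),
   ("basehttpserver", (1, "2.7")), ("simplehttpserver", (1, "2.7")),
   ("dataclasses", (2, "3.7")), ("contextvars", (2, "3.7")),
   ("aiohttp", (3, "3.7")), ("asyncpg", (3, "3.7")), ("httpx", (3, "3.7")),
   ("fastapi", (3, "3.7")), ("uvicorn", (3, "3.7")),
   ("transformers", (4, "3.8")), ("diffusers", (4, "3.8")),
   ("accelerate", (4, "3.8")), ("datasets", (4, "3.8"))] := by decide

set_option maxHeartbeats 1000000 in
theorem pvKeysNodup : pvTable.keys.Nodup := by decide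

set_option maxHeartbeats 1000000 in
theorem pvEntry_cases (s : String) :
    pvTable.get? s = none ∨ pvTable.get? s = some (1, "2.7") ∨ pvTable.get? s = some (2, "3.7") ∨
    pvTable.get? s = some (3, "3.7") ∨ pvTable.get? s = some (4, "3.8") := by
  cases h : pvTable.get? s with
  | none => exact Or.inl rfl
  | some v =>
    have hm := PySem.Dict.mem_items_of_get?_eq_some pvTable h
    rw [pvItems] at hm
    simp only [List.mem_cons, List.not_mem_nil, or_false, Prod.mk.injEq] at hm
    rcases hm with ⟨_, rfl⟩|⟨_, rfl⟩|⟨_, rfl⟩|⟨_, rfl⟩|⟨_, rfl⟩|⟨_, rfl⟩|⟨_, rfl⟩|⟨_, rfl⟩|⟨_, rfl⟩|⟨_, rfl⟩|⟨_, rfl⟩|⟨_, rfl⟩|⟨_, rfl⟩|⟨_, rfl⟩|⟨_, rfl⟩|⟨_, rfl⟩|⟨_, rfl⟩|⟨_, rfl⟩|⟨_, rfl⟩ <;> simp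

theorem pvFoldl_none_eq_spec (l : List String) : l.foldl pvStep none = pvSpec l := by
  induction l with
  | nil => rfl
  | cons m l ih =>
    simp only [List.foldl_cons]
    rw [pvFoldl_comb, ih, pvStep_eq_comb, pvComb_none_left]
    rcases pvEntry_cases (PySem.Str.lower m) with h | h | h | h | h <;>
      simp only [pvSpec, List.any_cons, h] <;> simp <;>
      split_ifs <;> simp [pvComb]

set_option maxHeartbeats 1000000 in
theorem pvMem1 (s : String) :
    s ∈ (["mechanize", "cookielib", "htmlparser", "cstringio",
        "urlparse", "httplib", "basehttpserver", "simplehttpserver"] : List String) ↔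
      pvTable.get? s = some (1, "2.7") := by
  constructor
  · intro hs
    have hmem : (s, ((1 : Int), "2.7")) ∈ pvTable.items := by
      rw [pvItems]; simp only [List.mem_cons, List.not_mem_nil, or_false] at hs ⊢
      rcases hs with rfl|rfl|rfl|rfl|rfl|rfl|rfl|rfl <;> simp
    exact PySem.Dict.get?_of_mem_items pvTable hmem pvKeysNodup
  · intro h
    have hm := PySem.Dict.mem_items_of_get?_eq_some pvTable h
    rw [pvItems] at hm
    simp only [List.mem_cons, List.not_mem_nil, or_false, Prod.mk.injEq] at hm
    simp only [List.mem_cons, List.not_mem_nil, or_false]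
    rcases hm with ⟨rfl, _⟩|⟨rfl, _⟩|⟨rfl, _⟩|⟨rfl, _⟩|⟨rfl, _⟩|⟨rfl, _⟩|⟨rfl, _⟩|⟨rfl, _⟩|⟨rfl, h⟩|⟨rfl, h⟩|⟨rfl, h⟩|⟨rfl, h⟩|⟨rfl, h⟩|⟨rfl, h⟩|⟨rfl, h⟩|⟨rfl, h⟩|⟨rfl, h⟩|⟨rfl, h⟩|⟨rfl, h⟩ <;> simp_all

set_option maxHeartbeats 1000000 in
theorem pvMem2 (s : String) :
    s ∈ (["dataclasses", "contextvars"] : List String) ↔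
      pvTable.get? s = some (2, "3.7") := by
  constructor
  · intro hs
    have hmem : (s, ((2 : Int), "3.7")) ∈ pvTable.items := by
      rw [pvItems]; simp only [List.mem_cons, List.not_mem_nil, or_false] at hs ⊢
      rcases hs with rfl|rfl <;> simp
    exact PySem.Dict.get?_of_mem_items pvTable hmem pvKeysNodup
  · intro h
    have hm := PySem.Dict.mem_items_of_get?_eq_some pvTable h
    rw [pvItems] at hm
    simp only [List.mem_cons, List.not_mem_nil, or_false, Prod.mk.injEq] at hm
    simp only [List.mem_cons, List.not_mem_nil, or_false]
    rcases hm with ⟨rfl, h⟩|⟨rfl, h⟩|⟨rfl, h⟩|⟨rfl, h⟩|⟨rfl, h⟩|⟨rfl, h⟩|⟨rfl, h⟩|⟨rfl, h⟩|⟨rfl, _⟩|⟨rfl, _⟩|⟨rfl, h⟩|⟨rfl, h⟩|⟨rfl, h⟩|⟨rfl, h⟩|⟨rfl, h⟩|⟨rfl, h⟩|⟨rfl, h⟩|⟨rfl, h⟩|⟨rfl, h⟩ <;> simp_all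

set_option maxHeartbeats 1000000 in
theorem pvMem3 (s : String) :
    s ∈ (["aiohttp", "asyncpg", "httpx", "fastapi", "uvicorn"] : List String) ↔
      pvTable.get? s = some (3, "3.7") := by
  constructor
  · intro hs
    have hmem : (s, ((3 : Int), "3.7")) ∈ pvTable.items := by
      rw [pvItems]; simp only [List.mem_cons, List.not_mem_nil, or_false] at hs ⊢
      rcases hs with rfl|rfl|rfl|rfl|rfl <;> simp
    exact PySem.Dict.get?_of_mem_items pvTable hmem pvKeysNodup
  · intro h
    have hm := PySem.Dict.mem_items_of_get?_eq_some pvTable h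
    rw [pvItems] at hm
    simp only [List.mem_cons, List.not_mem_nil, or_false, Prod.mk.injEq] at hm
    simp only [List.mem_cons, List.not_mem_nil, or_false]
    rcases hm with ⟨rfl, h⟩|⟨rfl, h⟩|⟨rfl, h⟩|⟨rfl, h⟩|⟨rfl, h⟩|⟨rfl, h⟩|⟨rfl, h⟩|⟨rfl, h⟩|⟨rfl, h⟩|⟨rfl, h⟩|⟨rfl, _⟩|⟨rfl, _⟩|⟨rfl, _⟩|⟨rfl, _⟩|⟨rfl, _⟩|⟨rfl, h⟩|⟨rfl, h⟩|⟨rfl, h⟩|⟨rfl, h⟩ <;> simp_all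

set_option maxHeartbeats 1000000 in
theorem pvMem4 (s : String) :
    s ∈ (["transformers", "diffusers", "accelerate", "datasets"] : List String) ↔
      pvTable.get? s = some (4, "3.8") := by
  constructor
  · intro hs
    have hmem : (s, ((4 : Int), "3.8")) ∈ pvTable.items := by
      rw [pvItems]; simp only [List.mem_cons, List.not_mem_nil, or_false] at hs ⊢
      rcases hs with rfl|rfl|rfl|rfl <;> simp
    exact PySem.Dict.get?_of_mem_items pvTable hmem pvKeysNodup
  · intro h
    have hm := PySem.Dict.mem_items_of_get?_eq_some pvTable h
    rw [pvItems] at hm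
    simp only [List.mem_cons, List.not_mem_nil, or_false, Prod.mk.injEq] at hm
    simp only [List.mem_cons, List.not_mem_nil, or_false]
    rcases hm with ⟨rfl, h⟩|⟨rfl, h⟩|⟨rfl, h⟩|⟨rfl, h⟩|⟨rfl, h⟩|⟨rfl, h⟩|⟨rfl, h⟩|⟨rfl, h⟩|⟨rfl, h⟩|⟨rfl, h⟩|⟨rfl, h⟩|⟨rfl, h⟩|⟨rfl, h⟩|⟨rfl, h⟩|⟨rfl, h⟩|⟨rfl, _⟩|⟨rfl, _⟩|⟨rfl, _⟩|⟨rfl, _⟩ <;> simp_all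

theorem pvInter_ne_nil (modules : List String) (g : List String) :
    (PySem.Set.inter (PySem.Set.ofList (modules.map PySem.Str.lower)) (PySem.Set.ofList g) ≠ []) ↔
      ∃ m ∈ modules, PySem.Str.lower m ∈ g := by
  rw [← List.isEmpty_eq_false_iff, List.isEmpty_eq_false_iff_exists_mem]
  constructor
  · rintro ⟨x, hx⟩
    rcases (PySem.Set.mem_inter _ _ _).1 hx with ⟨hs, hg⟩
    rcases List.mem_map.1 ((PySem.Set.mem_ofList _ _).1 hs) with ⟨m, hm, rfl⟩
    exact ⟨m, hm, (PySem.Set.mem_ofList _ _).1 hg⟩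
  · rintro ⟨m, hm, hg⟩
    exact ⟨PySem.Str.lower m, (PySem.Set.mem_inter _ _ _).2
      ⟨(PySem.Set.mem_ofList _ _).2 (List.mem_map.2 ⟨m, hm, rfl⟩), (PySem.Set.mem_ofList _ _).2 hg⟩⟩

theorem pvCond (modules : List String) (g : List String) (e : Int × String)
    (hme : ∀ s, s ∈ g ↔ pvTable.get? s = some e) :
    (PySem.Set.inter (PySem.Set.ofList (modules.map PySem.Str.lower)) (PySem.Set.ofList g) ≠ []) ↔
      modules.any (fun m => pvTable.get? (PySem.Str.lower m) == some e) = true := by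
  rw [pvInter_ne_nil, List.any_eq_true]
  constructor
  · rintro ⟨m, hm, hg⟩
    exact ⟨m, hm, by simp [(hme _).1 hg]⟩
  · rintro ⟨m, hm, hb⟩
    exact ⟨m, hm, (hme _).2 (by simpa using hb)⟩

-- ===== VERDICT (by name: the statement is the Claim_ definition above) =====
theorem smart_python_version_from_imports_spec : Claim_equal_smart_python_version_from_imports := by
  intro modules _
  unfold Spec_smart_python_version_from_imports
  unfold smart_python_version_from_imports smart_python_version_from_imports_alt
  rw [pvFoldl_none_eq_spec]
  have c1 := pvCond modules _ (1, "2.7") pvMem1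
  have c2 := pvCond modules _ (2, "3.7") pvMem2
  have c3 := pvCond modules _ (3, "3.7") pvMem3
  have c4 := pvCond modules _ (4, "3.8") pvMem4
  simp only [pvSpec, c1, c2, c3, c4]
  split_ifs <;> rfl
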